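-- pv_equiv track=rewrite | github.com/sueszli/vector-database-benchmark | dataset/python-mutated/loop_control_flow_test.py | break_in_inner_for
-- ===== SOURCE A (Python) =====
-- def break_in_inner_for(m):
--     if False:
--         while True:
--             i = 10
--     s = 0
--     for l in m:
--         for c in l:
--             if c % 2 > 0:
--                 break
--             s += c
--     return s
-- ===== SOURCE B (Python) =====
-- def break_in_inner_for(m):
--     if not m:
--         return 0
--     l = m[0]
--     k = 0
--     while k < len(l) and l[k] % 2 == 0:
--         k += 1
--     return sum(l[:k]) + break_in_inner_for(m[1:])
-- ===== Notes on version B (the rewrite author's own statement) =====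
-- stated objective: alternative
-- what changed: Recursion over the rows replaces the outer loop, and per row an index-based while loop only locates the first odd position, after which sum(l[:k]) does the accumulation as a separate staged pass (A interleaves break-and-add over elements; the dead 'if False' block is dropped).
import Mathlib
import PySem

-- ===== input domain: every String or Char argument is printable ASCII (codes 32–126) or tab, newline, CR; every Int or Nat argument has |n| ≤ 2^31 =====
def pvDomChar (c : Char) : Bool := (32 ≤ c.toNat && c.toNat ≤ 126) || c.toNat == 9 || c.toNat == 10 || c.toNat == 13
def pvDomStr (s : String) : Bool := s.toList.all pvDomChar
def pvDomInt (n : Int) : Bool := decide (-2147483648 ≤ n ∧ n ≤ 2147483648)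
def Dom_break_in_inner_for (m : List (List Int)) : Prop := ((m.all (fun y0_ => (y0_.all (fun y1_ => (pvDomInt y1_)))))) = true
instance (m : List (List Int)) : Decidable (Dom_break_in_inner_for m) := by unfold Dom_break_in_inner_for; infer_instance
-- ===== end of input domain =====

-- B recurses over the rows and, per row, first locates the cut index with an index-based
-- while loop, then sums the slice l[:k] as a separate pass; A interleaves break-and-add.

-- ===== PORT A =====
-- inner 'for c in l: if c % 2 > 0: break; s += c' as structural recursion on l carrying s
def pvInnerA (l : List Int) (s : Int) : Int :=
  match l with
  | [] => s
  | c :: cs => if PySem.Int.mod c 2 > 0 then s else pvInnerA cs (s + c)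

def break_in_inner_for (m : List (List Int)) : Int :=
  m.foldl (fun s l => pvInnerA l s) 0

-- ===== PORT B =====
-- 'while k < len(l) and l[k] % 2 == 0: k += 1' — index-based loop, decreasing on len(l) - k
def pvCut (l : List Int) (k : Nat) : Nat :=
  if h : k < l.length then
    if PySem.Int.mod l[k] 2 == 0 then pvCut l (k + 1) else k
  else k
termination_by l.length - k

def break_in_inner_for_alt (m : List (List Int)) : Int :=
  match m with
  | [] => 0
  | l :: rest => (l.take (pvCut l 0)).sum + break_in_inner_for_alt rest

-- ===== PRECONDITION & SPEC =====
def Spec_break_in_inner_for (m : List (List Int)) (out : Int) : Prop := out = break_in_inner_for_alt m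
instance (m : List (List Int)) (out : Int) : Decidable (Spec_break_in_inner_for m out) := by unfold Spec_break_in_inner_for; infer_instance

-- ===== CLAIM =====
def Claim_equal_break_in_inner_for : Prop := ∀ (m : List (List Int)), Dom_break_in_inner_for m → Spec_break_in_inner_for m (break_in_inner_for m)

-- ===== LEMMAS AND PROOFS =====
theorem pv_fmod_two (c : Int) : Int.fmod c 2 = c % 2 := by
  simp [Int.fmod_eq_emod]

theorem pvCut_stop (l : List Int) (k : Nat) (h : ¬ k < l.length) : pvCut l k = k := by
  rw [pvCut]; simp [h]

theorem pvCut_shift (c : Int) (cs : List Int) :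
    ∀ n k, cs.length - k ≤ n → pvCut (c :: cs) (k + 1) = pvCut cs k + 1 := by
  intro n
  induction n with
  | zero =>
    intro k hk
    have hk' : ¬ k < cs.length := by omega
    rw [pvCut_stop (c :: cs) (k + 1) (by simp; omega), pvCut_stop cs k hk']
  | succ n ih =>
    intro k hk
    by_cases h : k < cs.length
    · have h1 : k + 1 < (c :: cs).length := by simp; omega
      rw [pvCut]
      simp only [h1, dif_pos]
      have hget : (c :: cs)[k + 1]'h1 = cs[k]'h := by simp
      rw [hget]
      conv_rhs => rw [pvCut]
      simp only [h, dif_pos]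
      by_cases he : (PySem.Int.mod (cs[k]'h) 2 == 0) = true
      · rw [if_pos he, if_pos he]
        exact ih (k + 1) (by omega)
      · rw [if_neg he, if_neg he]
    · rw [pvCut_stop (c :: cs) (k + 1) (by simp; omega), pvCut_stop cs k h]

theorem pvCut_takeWhile (l : List Int) :
    l.take (pvCut l 0) = l.takeWhile (fun c => PySem.Int.mod c 2 == 0) := by
  induction l with
  | nil => simp [pvCut]
  | cons c cs ih =>
    rw [pvCut]
    have h0 : 0 < (c :: cs).length := by simp
    simp only [h0, dif_pos, List.getElem_cons_zero]
    by_cases he : (PySem.Int.mod c 2 == 0) = true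
    · rw [if_pos he, pvCut_shift c cs cs.length 0 (by omega), List.take_succ_cons,
        List.takeWhile_cons, if_pos he, ih]
    · rw [if_neg he, List.take_zero, List.takeWhile_cons, if_neg he]

theorem pvInnerA_eq (l : List Int) (s : Int) :
    pvInnerA l s = s + (l.takeWhile (fun c => PySem.Int.mod c 2 == 0)).sum := by
  induction l generalizing s with
  | nil => simp [pvInnerA]
  | cons c cs ih =>
    have h0 : 0 ≤ c % 2 := Int.emod_nonneg c (by norm_num)
    have h2 : c % 2 < 2 := Int.emod_lt_of_pos c (by norm_num)
    by_cases h : c % 2 > 0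
    · have hne : (c % 2 == 0) = false := by simp; omega
      simp [pvInnerA, PySem.Int.mod, pv_fmod_two, List.takeWhile, h, hne]
    · have he : (c % 2 == 0) = true := by simp; omega
      simp [pvInnerA, PySem.Int.mod, pv_fmod_two, List.takeWhile, h, he, ih]
      ring

theorem foldl_innerA (m : List (List Int)) (s : Int) :
    m.foldl (fun s l => pvInnerA l s) s = s + break_in_inner_for_alt m := by
  induction m generalizing s with
  | nil => simp [break_in_inner_for_alt]
  | cons l ls ih =>
    rw [List.foldl_cons, ih, pvInnerA_eq]
    simp only [break_in_inner_for_alt, pvCut_takeWhile]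
    ring

-- ===== VERDICT =====
theorem break_in_inner_for_spec : Claim_equal_break_in_inner_for := by
  intro m _
  unfold Spec_break_in_inner_for break_in_inner_for
  simpa using foldl_innerA m 0
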